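-- pv_equiv track=rewrite | github.com/dannyp0930/algorithm | baekjoon/25166_배고픈아리의샌드위치구매하기.py | solution
-- ===== SOURCE A (Python) =====
-- def solution(S, M):
--     if S < 1024:
--         return 'No thanks'
--     S -= 1023
--     for _ in range(10):
--         if S & 1 != M & 1:
--             return 'Impossible'
--         S >>= 1
--         M >>= 1
--     return 'Thanks'
-- ===== SOURCE B (Python) =====
-- def solution(S, M):
--     if S < 1024:
--         return 'No thanks'
--     return 'Thanks' if (S - 1023 - M) % 1024 == 0 else 'Impossible'
-- ===== Notes on version B (the rewrite author's own statement) =====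
-- stated objective: simpler
-- what changed: Replaces the 10-iteration bit-by-bit shift-and-compare loop with a single closed-form modular check: (S - 1023 - M) % 1024 == 0, since the loop accepts exactly when S-1023 and M agree on their low 10 bits, i.e. are congruent mod 1024.
import Mathlib
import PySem

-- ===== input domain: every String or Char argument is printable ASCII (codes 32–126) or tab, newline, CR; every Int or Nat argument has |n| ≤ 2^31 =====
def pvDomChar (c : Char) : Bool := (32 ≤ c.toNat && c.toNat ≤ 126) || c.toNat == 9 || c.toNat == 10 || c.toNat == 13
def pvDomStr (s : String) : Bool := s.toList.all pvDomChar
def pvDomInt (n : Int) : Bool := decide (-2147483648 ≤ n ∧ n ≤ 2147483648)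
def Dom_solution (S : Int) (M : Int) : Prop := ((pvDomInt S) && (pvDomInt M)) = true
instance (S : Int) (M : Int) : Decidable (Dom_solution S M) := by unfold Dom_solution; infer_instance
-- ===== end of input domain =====

-- B replaces A's 10-step shift-and-compare loop with one modular congruence check (simpler).

-- ===== PORT A =====
-- the for-loop with early return, as structural recursion on the remaining iteration count
def solutionLoop (s m : Int) : Nat → String
  | 0 => "Thanks"
  | k + 1 =>
    if PySem.Int.band s 1 ≠ PySem.Int.band m 1 then "Impossible"
    else solutionLoop (s >>> (1:Nat)) (m >>> (1:Nat)) k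

def solution (S : Int) (M : Int) : String :=
  if S < 1024 then "No thanks"
  else solutionLoop (S - 1023) M 10

-- ===== PORT B =====
def solution_alt (S : Int) (M : Int) : String :=
  if S < 1024 then "No thanks"
  else if PySem.Int.mod (S - 1023 - M) 1024 = 0 then "Thanks" else "Impossible"

-- ===== PRECONDITION & SPEC =====
def Spec_solution (S : Int) (M : Int) (out : String) : Prop := out = solution_alt S M
instance (S : Int) (M : Int) (out : String) : Decidable (Spec_solution S M out) := by unfold Spec_solution; infer_instance

-- ===== CLAIM (what is proved, stated in full; the proofs are below) =====
def Claim_equal_solution : Prop := ∀ (S : Int) (M : Int), Dom_solution S M → Spec_solution S M (solution S M)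

-- ===== LEMMAS AND PROOFS =====

lemma shiftRight_one_eq (s : Int) : s >>> (1 : Nat) = s / 2 := by
  simp [Int.shiftRight_eq_div_pow]

lemma dvd_step (p s m : Int) :
    2 * p ∣ s - m ↔ (s % 2 = m % 2 ∧ p ∣ s / 2 - m / 2) := by
  constructor
  · rintro ⟨c, hc⟩
    have hd : s - m = 2 * (p * c) := by rw [hc]; ring
    have hpar : s % 2 = m % 2 ∧ s / 2 - m / 2 = p * c := by omega
    exact ⟨hpar.1, hpar.2 ▸ ⟨c, rfl⟩⟩
  · rintro ⟨hpar, c, hc⟩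
    have hd : s - m = 2 * (p * c) := by omega
    exact ⟨c, by rw [hd]; ring⟩

lemma loop_eq (k : Nat) (s m : Int) :
    solutionLoop s m k = if (s - m) % (2 ^ k : Int) = 0 then "Thanks" else "Impossible" := by
  induction k generalizing s m with
  | zero => simp [solutionLoop]
  | succ k ih =>
    rw [solutionLoop, ih, shiftRight_one_eq, shiftRight_one_eq]
    have h1 : PySem.Int.band s 1 = s % 2 := by
      rw [PySem.Int.band_one]; simp [PySem.Int.mod, Int.fmod_eq_emod]
    have h2 : PySem.Int.band m 1 = m % 2 := by
      rw [PySem.Int.band_one]; simp [PySem.Int.mod, Int.fmod_eq_emod]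
    have hdvd1 : ((s - m) % (2 ^ (k + 1) : Int) = 0) ↔ (2 ^ (k + 1) : Int) ∣ s - m :=
      ⟨Int.dvd_of_emod_eq_zero, Int.emod_eq_zero_of_dvd⟩
    have hdvd2 : ((s / 2 - m / 2) % (2 ^ k : Int) = 0) ↔ (2 ^ k : Int) ∣ s / 2 - m / 2 :=
      ⟨Int.dvd_of_emod_eq_zero, Int.emod_eq_zero_of_dvd⟩
    have hpow : (2 ^ (k + 1) : Int) = 2 * 2 ^ k := by ring
    rw [h1, h2]
    by_cases hpar : s % 2 = m % 2
    · simp only [hpar, ne_eq, not_true_eq_false, if_false]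
      congr 1
      rw [eq_iff_iff, hdvd1, hdvd2, hpow, dvd_step]
      exact ⟨fun h => ⟨hpar, h⟩, fun h => h.2⟩
    · have : ¬ ((s - m) % (2 ^ (k + 1) : Int) = 0) := by
        rw [hdvd1, hpow, dvd_step]; tauto
      simp [hpar, this]

-- ===== VERDICT (by name: the statement is the Claim_ definition above) =====
theorem solution_spec : Claim_equal_solution := by
  intro S M _
  unfold Spec_solution solution solution_alt
  by_cases h : S < 1024
  · simp [h]
  · simp only [h, if_false]
    rw [loop_eq]
    have hm : PySem.Int.mod (S - 1023 - M) 1024 = (S - 1023 - M) % 1024 := by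
      simp [PySem.Int.mod, Int.fmod_eq_emod]
    have : (S - 1023 - M : Int) = (S - 1023) - M := by ring
    rw [hm, ← this]
    norm_num
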